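-- pv_equiv track=rewrite | github.com/patronrpg/patronrpg.github.io | scripts/simple_character_generator.py | load_subclass_skills
-- ===== SOURCE A (Python) =====
-- def load_subclass_skills(data, subclasses_list):
--     subclass_skills = {}
--     current_subclass = None
--     for line in data.splitlines():
--         if line.strip():
--             if line.strip() in subclasses_list:
--                 current_subclass = line.strip()
--                 subclass_skills[current_subclass] = []
--                 continue
--             if current_subclass:
--                 subclass_skills[current_subclass].append(line.strip())
--     return subclass_skills
-- ===== SOURCE B (Python) =====
-- def load_subclass_skills(data, subclasses_list):
--     # Section-based scan: strip all lines once, then walk from header to header,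
--     # assigning each header the filtered slice of lines up to the next header.
--     lines = [l.strip() for l in data.splitlines()]
--
--     def is_header(l):
--         return bool(l) and l in subclasses_list
--
--     result = {}
--     i, n = 0, len(lines)
--     while i < n:
--         if is_header(lines[i]):
--             j = i + 1
--             while j < n and not is_header(lines[j]):
--                 j += 1
--             result[lines[i]] = [l for l in lines[i + 1:j] if l]
--             i = j
--         else:
--             i += 1
--     return result
-- ===== Notes on version B (the rewrite author's own statement) =====
-- stated objective: alternative
-- what changed: Replaced the single pass with mutable current-subclass state and per-line dict appends by a two-level sectioning scan: strip all lines once, then jump from header to header assigning each header the whole filtered segment up to the next header in one dict assignment.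
import Mathlib
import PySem

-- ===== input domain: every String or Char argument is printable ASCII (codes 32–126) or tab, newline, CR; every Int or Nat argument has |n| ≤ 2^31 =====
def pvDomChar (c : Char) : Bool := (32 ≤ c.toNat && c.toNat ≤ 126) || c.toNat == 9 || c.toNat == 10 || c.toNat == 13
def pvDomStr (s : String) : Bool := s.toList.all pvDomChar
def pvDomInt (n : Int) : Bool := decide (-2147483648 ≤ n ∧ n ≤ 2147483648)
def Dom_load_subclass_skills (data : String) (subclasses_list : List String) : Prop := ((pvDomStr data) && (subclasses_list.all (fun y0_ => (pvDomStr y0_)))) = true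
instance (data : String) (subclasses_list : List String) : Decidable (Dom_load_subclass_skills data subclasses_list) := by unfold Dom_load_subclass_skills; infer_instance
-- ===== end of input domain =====

-- B replaces A's single pass with mutable current-subclass state and per-line dict appends
-- by a two-level sectioning scan (header to header, one dict assignment per section);
-- objective: alternative decomposition, same cost.

-- ===== PORT A =====
-- one iteration of A's for-loop; state = (subclass_skills, current_subclass)
def lssStep (subclasses_list : List String)
    (st : PySem.Dict String (List String) × Option String) (line : String) :
    PySem.Dict String (List String) × Option String :=
  if PySem.Str.strip line ≠ "" then
    if subclasses_list.contains (PySem.Str.strip line) then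
      (st.1.insert (PySem.Str.strip line) [], some (PySem.Str.strip line))
    else
      match st.2 with
      | some c =>
          -- `if current_subclass:` — truthy iff some nonempty string
          if c ≠ "" then (st.1.modify c [] (· ++ [PySem.Str.strip line]), some c) else st
      | none => st
  else st

def load_subclass_skills (data : String) (subclasses_list : List String) : List (String × List String) :=
  (((PySem.Str.splitlines data).foldl (lssStep subclasses_list)
      ((PySem.Dict.empty : PySem.Dict String (List String)), none)).1).items

-- ===== PORT B =====
def lssIsHeader (subclasses_list : List String) (l : String) : Bool :=
  !(l == "") && subclasses_list.contains l

-- the outer while-loop of B: at a header, the inner while-scan finds the segment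
-- up to the next header (takeWhile/dropWhile), assigned filtered in one step
def lssSections (subclasses_list : List String) :
    PySem.Dict String (List String) → List String → PySem.Dict String (List String)
  | d, [] => d
  | d, l :: ls =>
    if lssIsHeader subclasses_list l then
      lssSections subclasses_list
        (d.insert l ((ls.takeWhile (fun x => !lssIsHeader subclasses_list x)).filter
          (fun x => !(x == ""))))
        (ls.dropWhile (fun x => !lssIsHeader subclasses_list x))
    else lssSections subclasses_list d ls
  termination_by _ ls => ls.length
  decreasing_by
  · exact Nat.lt_succ_of_le (List.length_dropWhile_le _ _)
  · simp

def load_subclass_skills_alt (data : String) (subclasses_list : List String) : List (String × List String) :=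
  (lssSections subclasses_list (PySem.Dict.empty : PySem.Dict String (List String))
    ((PySem.Str.splitlines data).map PySem.Str.strip)).items

-- ===== PRECONDITION & SPEC =====
def Spec_load_subclass_skills (data : String) (subclasses_list : List String) (out : List (String × List String)) : Prop := out = load_subclass_skills_alt data subclasses_list
instance (data : String) (subclasses_list : List String) (out : List (String × List String)) : Decidable (Spec_load_subclass_skills data subclasses_list out) := by unfold Spec_load_subclass_skills; infer_instance

-- ===== CLAIM (what is proved, stated in full; the proofs are below) =====
def Claim_equal_load_subclass_skills : Prop := ∀ (data : String) (subclasses_list : List String), Dom_load_subclass_skills data subclasses_list → Spec_load_subclass_skills data subclasses_list (load_subclass_skills data subclasses_list)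

-- ===== LEMMAS AND PROOFS =====

-- A's step on an already-stripped line (proof helper)
def lssStepS (subclasses_list : List String)
    (st : PySem.Dict String (List String) × Option String) (s : String) :
    PySem.Dict String (List String) × Option String :=
  if s ≠ "" then
    if subclasses_list.contains s then (st.1.insert s [], some s)
    else
      match st.2 with
      | some c => if c ≠ "" then (st.1.modify c [] (· ++ [s]), some c) else st
      | none => st
  else st

theorem lss_modify_insert (d : PySem.Dict String (List String)) (h : String)
    (v : List String) (f : List String → List String) :
    (d.insert h v).modify h [] f = d.insert h (f v) := by
  show (d.insert h v).insert h (f ((d.insert h v).getD h [])) = d.insert h (f v)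
  rw [PySem.Dict.getD_insert_self, PySem.Dict.insert_insert_self]

-- append phase: after a header h has just been entered with accumulated value v,
-- the rest of A's fold equals B's sectioning resumed at the next header
theorem lss_phase (subs : List String) :
    ∀ (L : List String) (d : PySem.Dict String (List String)) (h : String) (v : List String),
      lssIsHeader subs h = true →
      (L.foldl (lssStepS subs) (d.insert h v, some h)).1 =
        lssSections subs
          (d.insert h (v ++ (L.takeWhile (fun x => !lssIsHeader subs x)).filter
            (fun x => !(x == ""))))
          (L.dropWhile (fun x => !lssIsHeader subs x)) := by
  intro L
  induction L with
  | nil => intro d h v _; simp [lssSections]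
  | cons l ls ih =>
    intro d h v hh
    have hne : h ≠ "" := by
      intro he; rw [he] at hh; simp [lssIsHeader] at hh
    by_cases hl : l = ""
    · subst hl
      have hhl : lssIsHeader subs "" = false := by simp [lssIsHeader]
      have hstep : lssStepS subs (d.insert h v, some h) "" = (d.insert h v, some h) := by
        simp [lssStepS]
      simp only [List.foldl_cons, hstep, List.takeWhile_cons, List.dropWhile_cons, hhl,
        Bool.not_false, if_true, List.filter_cons]
      simpa using ih d h v hh
    · by_cases hc : l ∈ subs
      · have hhl : lssIsHeader subs l = true := by simp [lssIsHeader, hc, hl]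
        have hstep : lssStepS subs (d.insert h v, some h) l =
            ((d.insert h v).insert l [], some l) := by
          simp [lssStepS, hl, hc]
        simp only [List.foldl_cons, hstep, List.takeWhile_cons, List.dropWhile_cons, hhl,
          Bool.not_true]
        have := ih (d.insert h v) l [] hhl
        simp only [List.nil_append] at this
        rw [this]
        simp [lssSections, hhl]
      · have hhl : lssIsHeader subs l = false := by simp [lssIsHeader, hc]
        have hstep : lssStepS subs (d.insert h v, some h) l =
            (d.insert h (v ++ [l]), some h) := by
          simp [lssStepS, hl, hc, hne, lss_modify_insert]
        simp only [List.foldl_cons, hstep, List.takeWhile_cons, List.dropWhile_cons, hhl,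
          Bool.not_false, if_true, List.filter_cons]
        have := ih d h (v ++ [l]) hh
        rw [this]
        simp [hl]

-- before any header has been seen, A's fold equals B's sectioning
theorem lss_none (subs : List String) :
    ∀ (L : List String) (d : PySem.Dict String (List String)),
      (L.foldl (lssStepS subs) (d, none)).1 = lssSections subs d L := by
  intro L
  induction L with
  | nil => intro d; simp [lssSections]
  | cons l ls ih =>
    intro d
    by_cases hhl : lssIsHeader subs l = true
    · have hl : l ≠ "" := by
        intro he; rw [he] at hhl; simp [lssIsHeader] at hhl
      have hc : l ∈ subs := by
        have := hhl; simp [lssIsHeader] at this; exact this.2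
      have hstep : lssStepS subs (d, none) l = (d.insert l [], some l) := by
        simp [lssStepS, hl, hc]
      simp only [List.foldl_cons, hstep]
      have := lss_phase subs ls d l [] hhl
      simp only [List.nil_append] at this
      rw [this]
      simp [lssSections, hhl]
    · have hskip : lssStepS subs (d, none) l = (d, none) := by
        by_cases hl : l = ""
        · simp [lssStepS, hl]
        · have hc : l ∉ subs := by
            intro hm
            exact hhl (by simp [lssIsHeader, hl, hm])
          simp [lssStepS, hl, hc]
      simp only [List.foldl_cons, hskip, ih d]
      simp [lssSections, hhl]

theorem lss_main (data : String) (subs : List String) :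
    load_subclass_skills data subs = load_subclass_skills_alt data subs := by
  unfold load_subclass_skills load_subclass_skills_alt
  rw [show lssStep subs = (fun st y => lssStepS subs st (PySem.Str.strip y)) from rfl,
    ← List.foldl_map, lss_none subs]

-- ===== VERDICT (by name: the statement is the Claim_ definition above) =====
theorem load_subclass_skills_spec : Claim_equal_load_subclass_skills := by
  intro data subs _
  unfold Spec_load_subclass_skills
  exact lss_main data subs
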